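-- pv_equiv track=rewrite | github.com/MikeTsenatek/aoc2023 | 02/main.py | get_max_cubes
-- ===== SOURCE A (Python) =====
-- def get_max_cubes(plays):
--     max_cubes = {
--         'red': [],
--         'blue': [],
--         'green': [],
--     }
--     for play in plays.values():
--         for part in play:
--             max_cubes[part].append(play[part])
--     return {
--         'red': max(max_cubes['red']),
--         'blue': max(max_cubes['blue']),
--         'green': max(max_cubes['green']),
--     }
-- ===== SOURCE B (Python) =====
-- def get_max_cubes(plays):
--     best = dict.fromkeys(('red', 'blue', 'green'))
--     for play in plays.values():
--         for color, n in play.items():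
--             if best[color] is None or best[color] < n:
--                 best[color] = n
--     return best
-- ===== Notes on version B (the rewrite author's own statement) =====
-- stated objective: simpler
-- what changed: Replaces A's dict of per-color lists (built in one pass, then reduced with three max() calls) by a single pass that keeps one running maximum per color and returns that dict directly, with no intermediate lists and no separate reduce phase; Pre_ excludes exactly the inputs on which A raises (a color key other than red/blue/green, or a color appearing in no play).
-- outside the precondition, e.g. on get_max_cubes({}): A raises ValueError, B returns {'red': None, 'blue': None, 'green': None}
import Mathlib
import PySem

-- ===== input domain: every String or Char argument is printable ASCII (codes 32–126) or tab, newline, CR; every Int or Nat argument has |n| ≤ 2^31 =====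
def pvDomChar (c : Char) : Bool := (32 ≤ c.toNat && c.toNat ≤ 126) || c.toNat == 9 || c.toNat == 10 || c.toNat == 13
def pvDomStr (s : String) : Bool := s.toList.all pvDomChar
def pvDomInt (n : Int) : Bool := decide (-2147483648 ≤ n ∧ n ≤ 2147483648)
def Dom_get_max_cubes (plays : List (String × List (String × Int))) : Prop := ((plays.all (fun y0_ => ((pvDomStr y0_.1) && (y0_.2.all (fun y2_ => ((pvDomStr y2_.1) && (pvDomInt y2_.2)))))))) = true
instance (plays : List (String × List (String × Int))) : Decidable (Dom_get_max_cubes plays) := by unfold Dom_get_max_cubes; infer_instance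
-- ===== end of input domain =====

-- B keeps one running maximum per color in a single pass instead of A's dict of per-color lists reduced by three max calls (simpler decomposition; equivalence of RETURN values on Pre_).

-- ===== PORT A =====
-- inner loop: for part in play: max_cubes[part].append(play[part])   (each play's association
-- list is decoded to its Python dict with PySem.Dict.ofList, as Python receives it)
def pvAInner (play : PySem.Dict String Int) (mc : PySem.Dict String (List Int)) : PySem.Dict String (List Int) :=
  play.items.foldl (fun mc part => mc.modify part.1 [] (fun l => l ++ [(play.get? part.1).getD 0])) mc

def get_max_cubes (plays : List (String × List (String × Int))) : List (String × Int) :=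
  let mc := plays.foldl (fun mc play => pvAInner (PySem.Dict.ofList play.2) mc)
      (PySem.Dict.ofList [("red", ([] : List Int)), ("blue", []), ("green", [])])
  [("red", (PySem.List.max? (mc.getD "red" []) (fun x => x)).getD 0),
   ("blue", (PySem.List.max? (mc.getD "blue" []) (fun x => x)).getD 0),
   ("green", (PySem.List.max? (mc.getD "green" []) (fun x => x)).getD 0)]

-- ===== PORT B =====
-- if best[color] is None or best[color] < n: best[color] = n   (best[color] raises KeyError for a
-- color outside the three; outside Pre_, so the .getD none is never read)
def pvBStep (best : PySem.Dict String (Option Int)) (kv : String × Int) : PySem.Dict String (Option Int) :=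
  match (best.get? kv.1).getD none with
  | none => best.insert kv.1 (some kv.2)
  | some m => if m < kv.2 then best.insert kv.1 (some kv.2) else best

def get_max_cubes_alt (plays : List (String × List (String × Int))) : List (String × Int) :=
  -- best = dict.fromkeys(('red', 'blue', 'green'))
  let best := plays.foldl (fun best play => (PySem.Dict.ofList play.2).items.foldl pvBStep best)
      (PySem.Dict.ofList [("red", (none : Option Int)), ("blue", none), ("green", none)])
  -- return best — its keys are exactly the three colors (pvBStep only overwrites existing keys
  -- inside Pre_); a cell still None means the color never appeared, outside Pre_, so the
  -- realising .getD 0 is never read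
  [("red", ((best.get? "red").getD none).getD 0),
   ("blue", ((best.get? "blue").getD none).getD 0),
   ("green", ((best.get? "green").getD none).getD 0)]

-- ===== PRECONDITION & SPEC =====
-- Pre_ excludes exactly the inputs where Python A raises — a key other than red/blue/green in some
-- play (KeyError) or a color appearing in no play (ValueError on max([])).
def Pre_get_max_cubes (plays : List (String × List (String × Int))) : Prop :=
  (∀ p ∈ plays, ∀ kv ∈ p.2, kv.1 = "red" ∨ kv.1 = "blue" ∨ kv.1 = "green")
  ∧ (∀ c ∈ (["red", "blue", "green"] : List String), ∃ p ∈ plays, c ∈ p.2.map Prod.fst)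
instance (plays : List (String × List (String × Int))) : Decidable (Pre_get_max_cubes plays) := by
  unfold Pre_get_max_cubes; infer_instance

def pvWitness_get_max_cubes : (List (String × List (String × Int))) :=
  [("a", [("red", 1), ("green", 5)]), ("b", [("blue", 2), ("green", 3), ("red", 9)])]

def Spec_get_max_cubes (plays : List (String × List (String × Int))) (out : List (String × Int)) : Prop := out = get_max_cubes_alt plays
instance (plays : List (String × List (String × Int))) (out : List (String × Int)) : Decidable (Spec_get_max_cubes plays out) := by unfold Spec_get_max_cubes; infer_instance

-- ===== CLAIM (what is proved, stated in full; the proofs are below) =====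
def Claim_equal_get_max_cubes : Prop := ∀ (plays : List (String × List (String × Int))), Dom_get_max_cubes plays → Pre_get_max_cubes plays → Spec_get_max_cubes plays (get_max_cubes plays)

-- ===== LEMMAS AND PROOFS =====

-- the per-color value stream both programs consume, in the same order
def pvVals (plays : List (String × List (String × Int))) (c : String) : List Int :=
  plays.flatMap (fun p => ((PySem.Dict.ofList p.2).items.filter (fun q => q.1 == c)).map (·.2))

-- B's conditional update as a function on the cell value
def pvUpd (cur : Option Int) (n : Int) : Option Int :=
  match cur with
  | none => some n
  | some m => if m < n then some n else some m

-- ===== A-side lemmas =====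

lemma pv_keys_ofList (l : List (String × Int)) :
    (PySem.Dict.ofList l).keys = PySem.Set.ofList (l.map Prod.fst) := by
  rw [show PySem.Dict.ofList l = l.foldl (fun d p => d.insert p.1 p.2) PySem.Dict.empty from rfl]
  rw [PySem.Dict.keys_foldl_insert_key]
  simp [PySem.Dict.keys_empty, PySem.Set.update_nil_left]

lemma pv_inner_eq (play : PySem.Dict String Int) (h : play.keys.Nodup)
    (mc : PySem.Dict String (List Int)) :
    pvAInner play mc = play.items.foldl (fun d p => d.modify p.1 [] (fun l => l ++ [p.2])) mc := by
  unfold pvAInner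
  apply PySem.List.foldl_congr_mem
  intro acc x hx
  rw [PySem.Dict.get?_of_mem_items _ hx h]
  rfl

lemma pv_outer (plays : List (String × List (String × Int)))
    (mc : PySem.Dict String (List Int)) (c : String) :
    (plays.foldl (fun mc play => pvAInner (PySem.Dict.ofList play.2) mc) mc).getD c []
      = mc.getD c [] ++ pvVals plays c := by
  induction plays generalizing mc with
  | nil => simp [pvVals]
  | cons p t ih =>
    rw [List.foldl_cons, ih,
        pv_inner_eq (PySem.Dict.ofList p.2) (PySem.Dict.nodup_keys_ofList p.2) mc,
        PySem.Dict.getD_foldl_modify_append]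
    simp [pvVals, List.flatMap_cons]

-- ===== B-side lemmas =====

-- for a color c the dict already carries, one step keeps it carried and updates it with pvUpd
lemma pv_step_get? (best : PySem.Dict String (Option Int)) (kv : String × Int) (c : String)
    (v : Option Int) (h : best.get? c = some v) :
    (pvBStep best kv).get? c = some (if kv.1 = c then pvUpd v kv.2 else v) := by
  unfold pvBStep pvUpd
  by_cases hk : kv.1 = c
  · rw [hk, h]
    rcases v with _ | m
    · simp [PySem.Dict.get?_insert_self]
    · by_cases hm : m < kv.2
      · simp [hm, PySem.Dict.get?_insert_self]
      · simp [hm, h]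
  · rcases hcur : (best.get? kv.1).getD none with _ | m
    · simp [hk, h, PySem.Dict.get?_insert_of_ne _ _ (fun h' => hk h'.symm)]
    · by_cases hm : m < kv.2
      · simp [hk, hm, h, PySem.Dict.get?_insert_of_ne _ _ (fun h' => hk h'.symm)]
      · simp [hk, hm, h]

lemma pv_cell_inner (l : List (String × Int)) (best : PySem.Dict String (Option Int)) (c : String)
    (v : Option Int) (h : best.get? c = some v) :
    (l.foldl pvBStep best).get? c
      = some (((l.filter (fun q => q.1 == c)).map (·.2)).foldl pvUpd v) := by
  induction l generalizing best v with
  | nil => simpa using h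
  | cons kv t ih =>
    rw [List.foldl_cons]
    by_cases hk : kv.1 = c
    · have hb : (kv.1 == c) = true := beq_iff_eq.mpr hk
      rw [ih _ (pvUpd v kv.2) (by rw [pv_step_get? best kv c v h]; simp [hk])]
      simp [hb]
    · have hb : (kv.1 == c) = false := beq_false_of_ne hk
      rw [ih _ v (by rw [pv_step_get? best kv c v h]; simp [hk])]
      simp [hb]

lemma pv_cell_outer (plays : List (String × List (String × Int)))
    (best : PySem.Dict String (Option Int)) (c : String)
    (v : Option Int) (h : best.get? c = some v) :
    (plays.foldl (fun best play => (PySem.Dict.ofList play.2).items.foldl pvBStep best) best).get? c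
      = some ((pvVals plays c).foldl pvUpd v) := by
  induction plays generalizing best v with
  | nil => simpa [pvVals] using h
  | cons p t ih =>
    rw [List.foldl_cons]
    rw [ih _ _ (pv_cell_inner (PySem.Dict.ofList p.2).items best c v h)]
    simp [pvVals, List.flatMap_cons, List.foldl_append]

lemma pv_fold_some (vals : List Int) (a : Int) :
    vals.foldl pvUpd (some a) = some (vals.foldl max a) := by
  induction vals generalizing a with
  | nil => rfl
  | cons x t ih =>
    have : pvUpd (some a) x = some (max a x) := by
      unfold pvUpd
      by_cases hm : a < x
      · simp [hm, max_eq_right (le_of_lt hm)]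
      · simp [hm, max_eq_left (not_lt.mp hm)]
    simp [this, ih]

lemma pv_upd_cons (x : Int) (t : List Int) : (x :: t).foldl pvUpd none = some (t.foldl max x) := by
  rw [List.foldl_cons]
  exact pv_fold_some t x

lemma pv_vals_ne_nil (plays : List (String × List (String × Int))) (c : String)
    (h : ∃ p ∈ plays, c ∈ p.2.map Prod.fst) : pvVals plays c ≠ [] := by
  obtain ⟨p, hp, hc⟩ := h
  have hk : c ∈ (PySem.Dict.ofList p.2).keys := by
    rw [pv_keys_ofList]
    exact (PySem.Set.mem_ofList _ _).mpr hc
  rw [show (PySem.Dict.ofList p.2).keys = (PySem.Dict.ofList p.2).items.map (·.1) from rfl] at hk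
  obtain ⟨q, hq, hq1⟩ := List.mem_map.mp hk
  apply List.ne_nil_of_mem (a := q.2)
  unfold pvVals
  exact List.mem_flatMap.mpr ⟨p, hp, List.mem_map.mpr ⟨q, List.mem_filter.mpr ⟨hq, beq_iff_eq.mpr hq1⟩, rfl⟩⟩

-- ===== VERDICT (by name: the statement is the Claim_ definition above) =====
theorem get_max_cubes_spec : Claim_equal_get_max_cubes := by
  intro plays _ hpre
  unfold Spec_get_max_cubes
  simp only [get_max_cubes, get_max_cubes_alt]
  -- A's accumulated per-color lists
  have hA := pv_outer plays (PySem.Dict.ofList [("red", ([] : List Int)), ("blue", []), ("green", [])])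
  have hA0 : ∀ c ∈ (["red", "blue", "green"] : List String),
      (PySem.Dict.ofList [("red", ([] : List Int)), ("blue", []), ("green", [])]).getD c [] = [] := by decide
  -- B's final per-color cells: each color starts carried with value none
  have hcell : ∀ c ∈ (["red", "blue", "green"] : List String),
      (plays.foldl (fun best play => (PySem.Dict.ofList play.2).items.foldl pvBStep best)
        (PySem.Dict.ofList [("red", (none : Option Int)), ("blue", none), ("green", none)])).get? c
        = some ((pvVals plays c).foldl pvUpd none) := by
    intro c hc
    apply pv_cell_outer
    fin_cases hc <;> decide
  -- each color's value stream is nonempty, so both sides compute the same running max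
  obtain ⟨xr, tr, hr⟩ := List.exists_cons_of_ne_nil (pv_vals_ne_nil plays "red" (hpre.2 "red" (by decide)))
  obtain ⟨xb, tb, hb⟩ := List.exists_cons_of_ne_nil (pv_vals_ne_nil plays "blue" (hpre.2 "blue" (by decide)))
  obtain ⟨xg, tg, hg⟩ := List.exists_cons_of_ne_nil (pv_vals_ne_nil plays "green" (hpre.2 "green" (by decide)))
  rw [hA "red", hA "blue", hA "green",
      hA0 "red" (by decide), hA0 "blue" (by decide), hA0 "green" (by decide),
      hcell "red" (by decide), hcell "blue" (by decide), hcell "green" (by decide)]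
  simp only [List.nil_append, hr, hb, hg, pv_upd_cons, PySem.List.max?_id_cons, Option.getD_some]
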